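-- pv_equiv track=rewrite | github.com/Nuri-benbarka/EE432F2425 | recursion.py | sum_array_index
-- ===== SOURCE A (Python) =====
-- def sum_array_index(arr, start_index, end_index):
--     if start_index == end_index - 1:
--         return arr[start_index]
--     else:
--         half_index = (start_index + end_index) // 2
--         first_half_sum = sum_array_index(arr, start_index, half_index)
--         second_half_sum = sum_array_index(arr, half_index, end_index)
--         return first_half_sum + second_half_sum
-- ===== SOURCE B (Python) =====
-- def sum_array_index(arr, start_index, end_index):
--     total = 0
--     i = start_index
--     while i != end_index:
--         total += arr[i]
--         i += 1
--     return total
-- ===== Notes on version B (the rewrite author's own statement) =====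
-- stated objective: simpler
-- what changed: Replaces the divide-and-conquer bisection recursion with a single iterative accumulator loop that advances an index from start_index to end_index.
-- crash fix: On inputs with start_index == end_index A never reaches its base case and raises RecursionError; B's loop exits immediately and returns 0. — e.g. on sum_array_index([1, 2, 3], 1, 1): A raises RecursionError, B returns 0
import Mathlib
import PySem

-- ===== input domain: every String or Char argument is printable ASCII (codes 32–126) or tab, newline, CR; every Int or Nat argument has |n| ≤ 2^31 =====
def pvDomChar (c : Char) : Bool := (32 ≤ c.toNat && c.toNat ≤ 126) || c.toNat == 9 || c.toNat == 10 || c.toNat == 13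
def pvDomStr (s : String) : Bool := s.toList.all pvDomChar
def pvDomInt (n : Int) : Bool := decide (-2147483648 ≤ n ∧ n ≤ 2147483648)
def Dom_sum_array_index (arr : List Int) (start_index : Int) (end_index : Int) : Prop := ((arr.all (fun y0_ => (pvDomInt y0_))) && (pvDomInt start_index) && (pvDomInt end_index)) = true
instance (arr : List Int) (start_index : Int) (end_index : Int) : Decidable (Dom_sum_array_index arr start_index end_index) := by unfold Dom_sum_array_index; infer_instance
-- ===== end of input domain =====

-- B replaces A's divide-and-conquer bisection recursion with a plain iterative
-- accumulator loop over range(start_index, end_index); same cost, simpler shape.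

-- ===== PORT A =====
-- literal port of A's bisection recursion; arr[i] is pyGet? with getD 0 (the none
-- case — IndexError — is excluded by Pre_); the final 'else 0' is only a totality
-- guard for the region end_index ≤ start_index where Python A recurses forever.
def sum_array_index (arr : List Int) (start_index : Int) (end_index : Int) : Int :=
  if start_index = end_index - 1 then
    (PySem.List.pyGet? arr start_index).getD 0
  else if _h : start_index < end_index - 1 then
    let half_index := PySem.Int.floordiv (start_index + end_index) 2
    let first_half_sum := sum_array_index arr start_index half_index
    let second_half_sum := sum_array_index arr half_index end_index
    first_half_sum + second_half_sum
  else 0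
termination_by (end_index - start_index).toNat
decreasing_by
  · have h1 : start_index + 1 ≤ PySem.Int.floordiv (start_index + end_index) 2 :=
      (PySem.Int.le_floordiv_iff_mul_le (by omega)).2 (by omega)
    have h2 : PySem.Int.floordiv (start_index + end_index) 2 < end_index :=
      (PySem.Int.floordiv_lt_iff_lt_mul (by omega)).2 (by omega)
    omega
  · have h1 : start_index + 1 ≤ PySem.Int.floordiv (start_index + end_index) 2 :=
      (PySem.Int.le_floordiv_iff_mul_le (by omega)).2 (by omega)
    have h2 : PySem.Int.floordiv (start_index + end_index) 2 < end_index :=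
      (PySem.Int.floordiv_lt_iff_lt_mul (by omega)).2 (by omega)
    omega

-- ===== PORT B =====
-- literal port of Source B's while loop: total = 0; i = start; while i != end: total += arr[i]; i += 1.
-- The 'else total' branch is a totality guard for i past end_index, where the Python
-- loop runs into an IndexError (excluded by Pre_).
def sumWhile (arr : List Int) (end_index : Int) (i : Int) (total : Int) : Int :=
  if i = end_index then total
  else if _h : i < end_index then
    sumWhile arr end_index (i + 1) (total + (PySem.List.pyGet? arr i).getD 0)
  else total
termination_by (end_index - i).toNat
decreasing_by omega

def sum_array_index_alt (arr : List Int) (start_index : Int) (end_index : Int) : Int :=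
  sumWhile arr end_index start_index 0

-- ===== PRECONDITION & SPEC =====
-- Pre_ is exactly where Python A returns: on end_index ≤ start_index A recurses
-- forever (RecursionError), and with an index outside [-len, len) it raises IndexError.
def Pre_sum_array_index (arr : List Int) (start_index : Int) (end_index : Int) : Prop :=
  start_index < end_index ∧ -(arr.length : Int) ≤ start_index ∧ end_index ≤ (arr.length : Int)
instance (arr : List Int) (start_index : Int) (end_index : Int) : Decidable (Pre_sum_array_index arr start_index end_index) := by unfold Pre_sum_array_index; infer_instance
def pvWitness_sum_array_index : List Int × Int × Int := ([1, 2, 3], 0, 3)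

-- On inputs with start_index == end_index A never reaches its base case and raises
-- RecursionError; B's while loop exits immediately and returns 0.
def Raises_sum_array_index (arr : List Int) (start_index : Int) (end_index : Int) : Prop :=
  start_index = end_index
instance (arr : List Int) (start_index : Int) (end_index : Int) : Decidable (Raises_sum_array_index arr start_index end_index) := by unfold Raises_sum_array_index; infer_instance
def pvRaiseWitness_sum_array_index : List Int × Int × Int := ([1, 2, 3], 1, 1)
def pvRaiseWitnessOut_sum_array_index : Int := 0

def Spec_sum_array_index (arr : List Int) (start_index : Int) (end_index : Int) (out : Int) : Prop := out = sum_array_index_alt arr start_index end_index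
instance (arr : List Int) (start_index : Int) (end_index : Int) (out : Int) : Decidable (Spec_sum_array_index arr start_index end_index out) := by unfold Spec_sum_array_index; infer_instance

-- ===== CLAIM (what is proved, stated in full; the proofs are below) =====
def Claim_equal_sum_array_index : Prop := ∀ (arr : List Int) (start_index : Int) (end_index : Int), Dom_sum_array_index arr start_index end_index → Pre_sum_array_index arr start_index end_index → Spec_sum_array_index arr start_index end_index (sum_array_index arr start_index end_index)
def Claim_raises_sum_array_index : Prop := (∀ (arr : List Int) (start_index : Int) (end_index : Int), Dom_sum_array_index arr start_index end_index → Raises_sum_array_index arr start_index end_index → ¬ Pre_sum_array_index arr start_index end_index) ∧ (Dom_sum_array_index (pvRaiseWitness_sum_array_index.1) (pvRaiseWitness_sum_array_index.2.1) (pvRaiseWitness_sum_array_index.2.2) ∧ Raises_sum_array_index (pvRaiseWitness_sum_array_index.1) (pvRaiseWitness_sum_array_index.2.1) (pvRaiseWitness_sum_array_index.2.2) ∧ sum_array_index_alt (pvRaiseWitness_sum_array_index.1) (pvRaiseWitness_sum_array_index.2.1) (pvRaiseWitness_sum_array_index.2.2) = pvRaiseWitnessOut_sum_array_index)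

-- ===== LEMMAS AND PROOFS =====

-- B's while loop accumulates the sum of arr[i] over range(i, end) onto total
theorem sumWhile_eq_sum (arr : List Int) (e : Int) :
    ∀ (n : Nat) (i total : Int), (e - i).toNat ≤ n →
      sumWhile arr e i total =
        total + ((PySem.List.pyRange i e 1).map (fun j => (PySem.List.pyGet? arr j).getD 0)).sum := by
  intro n
  induction n with
  | zero =>
    intro i total hle
    rw [sumWhile, PySem.List.pyRange_one_eq_nil (by omega)]
    by_cases h : i = e
    · rw [if_pos h]; simp
    · rw [if_neg h, dif_neg (by omega)]; simp
  | succ n ih =>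
    intro i total hle
    rw [sumWhile]
    by_cases h : i = e
    · rw [if_pos h, PySem.List.pyRange_one_eq_nil (by omega)]; simp
    · rw [if_neg h]
      by_cases hlt : i < e
      · rw [dif_pos hlt, ih (i + 1) _ (by omega),
          PySem.List.pyRange_one_cons hlt, List.map_cons, List.sum_cons]
        ring
      · rw [dif_neg hlt, PySem.List.pyRange_one_eq_nil (by omega)]; simp

theorem alt_eq_sum (arr : List Int) (s e : Int) :
    sum_array_index_alt arr s e =
      ((PySem.List.pyRange s e 1).map (fun i => (PySem.List.pyGet? arr i).getD 0)).sum := by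
  rw [sum_array_index_alt, sumWhile_eq_sum arr e (e - s).toNat s 0 le_rfl, zero_add]

-- the two ports agree on every input (outside Pre_ both are totalised to agree as well)
theorem ports_eq (arr : List Int) :
    ∀ (n : Nat) (s e : Int), (e - s).toNat ≤ n →
      sum_array_index arr s e = sum_array_index_alt arr s e := by
  intro n
  induction n with
  | zero =>
    intro s e hle
    rw [sum_array_index, alt_eq_sum, PySem.List.pyRange_one_eq_nil (by omega)]
    rw [if_neg (by omega), dif_neg (by omega)]
    simp
  | succ n ih =>
    intro s e hle
    rw [sum_array_index, alt_eq_sum]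
    by_cases hb : s = e - 1
    · rw [if_pos hb]
      have : e = s + 1 := by omega
      subst this
      rw [PySem.List.pyRange_one_singleton]
      simp
    · rw [if_neg hb]
      by_cases hlt : s < e - 1
      · rw [dif_pos hlt]
        show sum_array_index arr s (PySem.Int.floordiv (s + e) 2) +
            sum_array_index arr (PySem.Int.floordiv (s + e) 2) e = _
        have h1 : s + 1 ≤ PySem.Int.floordiv (s + e) 2 :=
          (PySem.Int.le_floordiv_iff_mul_le (by omega)).2 (by omega)
        have h2 : PySem.Int.floordiv (s + e) 2 < e :=
          (PySem.Int.floordiv_lt_iff_lt_mul (by omega)).2 (by omega)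
        rw [ih s _ (by omega), ih _ e (by omega), alt_eq_sum, alt_eq_sum,
          PySem.List.pyRange_one_append s (PySem.Int.floordiv (s + e) 2) e (by omega) (by omega),
          List.map_append, List.sum_append]
      · rw [dif_neg hlt, PySem.List.pyRange_one_eq_nil (by omega)]
        simp

-- ===== VERDICT (by name: the statement is the Claim_ definition above) =====
theorem sum_array_index_spec : Claim_equal_sum_array_index := by
  intro arr s e _ _
  unfold Spec_sum_array_index
  exact ports_eq arr (e - s).toNat s e le_rfl

def sum_array_index_raises : Claim_raises_sum_array_index := by
  unfold Claim_raises_sum_array_index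
  refine ⟨by intro arr s e _ hr hp; exact absurd hp.1 (by unfold Raises_sum_array_index at hr; omega),
    by decide, by decide, ?_⟩
  show sum_array_index_alt [1, 2, 3] 1 1 = 0
  rw [alt_eq_sum, PySem.List.pyRange_one_eq_nil (by omega)]
  rfl
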